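-- pv_equiv track=rewrite | github.com/qn06142/coding-python | triple.py | solve_with_direct_mod
-- ===== SOURCE A (Python) =====
-- MOD = 123456789
--
-- def solve_with_direct_mod(n, k):
--     n = list(map(int, str(n)))
--     result = 0
--     for _ in range(k):
--         for i in n:
--             result = (result * 10 + i * 3) % MOD
--         n = list(map(int, str(result)))
--     return result
-- ===== SOURCE B (Python) =====
-- MOD = 123456789
--
-- def solve_with_direct_mod(n, k):
--     # One arithmetic step per round instead of a per-digit inner loop:
--     # appending the digits of r to a running value r is r*10**len(str(r)),
--     # and the 3*digit contributions sum to 3*r; the first round (result=0)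
--     # is simply (3*n) % MOD.
--     r = 0
--     if k > 0:
--         r = (3 * n) % MOD
--         for _ in range(k - 1):
--             r = (r * (10 ** len(str(r)) + 3)) % MOD
--     return r
-- ===== Notes on version B (the rewrite author's own statement) =====
-- stated objective: faster
-- what changed: B removes A's per-digit inner loop: each round becomes one modular arithmetic step r = r*(10**len(str(r))+3) % MOD, and the first round is the closed form (3*n) % MOD.
import Mathlib
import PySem

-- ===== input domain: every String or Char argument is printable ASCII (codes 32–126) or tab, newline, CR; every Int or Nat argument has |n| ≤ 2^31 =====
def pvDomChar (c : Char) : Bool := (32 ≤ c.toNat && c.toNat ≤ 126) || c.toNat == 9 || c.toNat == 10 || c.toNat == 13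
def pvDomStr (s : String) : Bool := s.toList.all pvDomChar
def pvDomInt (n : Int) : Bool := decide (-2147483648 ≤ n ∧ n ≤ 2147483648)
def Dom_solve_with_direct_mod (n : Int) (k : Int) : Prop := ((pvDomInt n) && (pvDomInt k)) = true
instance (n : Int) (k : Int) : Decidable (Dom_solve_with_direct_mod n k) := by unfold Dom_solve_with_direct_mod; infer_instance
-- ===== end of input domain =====

-- B replaces A's per-digit inner loop by one modular arithmetic step per round
-- (objective: faster, constant-factor — no digit decomposition per round).

-- ===== PORT A =====

def pvMOD : Int := 123456789

-- list(map(int, str(m))): int(c) on each character of str(m); exact for m ≥ 0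
-- (for m < 0, Python raises ValueError on '-', excluded by Pre_).
def pvDigitsA (m : Int) : List Int :=
  (PySem.Int.toStr m).toList.map (fun c => ((c.toNat : Int) - 48))

-- the inner 'for i in n: result = (result * 10 + i * 3) % MOD'
def pvInnerA (ds : List Int) (r : Int) : Int :=
  ds.foldl (fun a i => PySem.Int.mod (a * 10 + i * 3) pvMOD) r

-- the outer 'for _ in range(k)' loop, state (digits, result)
def pvLoopA : Nat → List Int → Int → Int
  | 0, _, r => r
  | j + 1, ds, r =>
      let r' := pvInnerA ds r
      pvLoopA j (pvDigitsA r') r'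

def solve_with_direct_mod (n : Int) (k : Int) : Int :=
  pvLoopA k.toNat (pvDigitsA n) 0

-- ===== PORT B =====

-- one round: r = (r * (10 ** len(str(r)) + 3)) % MOD
def pvStepB (r : Int) : Int :=
  PySem.Int.mod (r * ((10 : Int) ^ (PySem.Int.toStr r).toList.length + 3)) pvMOD

-- 'for _ in range(k - 1)'
def pvLoopB : Nat → Int → Int
  | 0, r => r
  | j + 1, r => pvLoopB j (pvStepB r)

def solve_with_direct_mod_alt (n : Int) (k : Int) : Int :=
  if k > 0 then pvLoopB (k.toNat - 1) (PySem.Int.mod (3 * n) pvMOD) else 0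

-- ===== PRECONDITION & SPEC =====
-- Pre_ excludes n < 0, on which A raises ValueError (int('-') while mapping int over str(n)).
def Pre_solve_with_direct_mod (n : Int) (k : Int) : Prop := 0 ≤ n
instance (n : Int) (k : Int) : Decidable (Pre_solve_with_direct_mod n k) := by
  unfold Pre_solve_with_direct_mod; infer_instance

def pvWitness_solve_with_direct_mod : Int × Int := (5, 3)

def Spec_solve_with_direct_mod (n : Int) (k : Int) (out : Int) : Prop := out = solve_with_direct_mod_alt n k
instance (n : Int) (k : Int) (out : Int) : Decidable (Spec_solve_with_direct_mod n k out) := by unfold Spec_solve_with_direct_mod; infer_instance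

-- ===== CLAIM (what is proved, stated in full; the proofs are below) =====
def Claim_equal_solve_with_direct_mod : Prop := ∀ (n : Int) (k : Int), Dom_solve_with_direct_mod n k → Pre_solve_with_direct_mod n k → Spec_solve_with_direct_mod n k (solve_with_direct_mod n k)


-- ===== LEMMAS AND PROOFS =====

-- value of a list of decimal digit characters, most significant first
def pvChVal (cs : List Char) : Int :=
  cs.foldl (fun a c => a * 10 + ((c.toNat : Int) - 48)) 0

lemma pvM_pos : (0 : Int) < pvMOD := by decide

-- toDigitsCore appends to its accumulator
lemma pvCore_append (f : Nat) : ∀ (n : Nat) (ds : List Char),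
    Nat.toDigitsCore 10 f n ds = Nat.toDigitsCore 10 f n [] ++ ds := by
  induction f with
  | zero => intro n ds; simp [Nat.toDigitsCore]
  | succ f ih =>
    intro n ds
    simp only [Nat.toDigitsCore]
    by_cases h : n / 10 = 0
    · simp [h]
    · simp only [h, if_false]
      rw [ih (n / 10) ((n % 10).digitChar :: ds), ih (n / 10) [(n % 10).digitChar]]
      simp

lemma pvDigitChar_val (m : Nat) (h : m < 10) :
    ((m.digitChar.toNat : Int) - 48) = (m : Int) := by
  interval_cases m <;> decide

lemma pvChVal_append_digit (cs : List Char) (c : Char) :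
    pvChVal (cs ++ [c]) = pvChVal cs * 10 + ((c.toNat : Int) - 48) := by
  simp [pvChVal, List.foldl_append]

-- value correctness of Nat.toDigits with enough fuel
lemma pvCore_val (f : Nat) : ∀ (n : Nat), n < f →
    pvChVal (Nat.toDigitsCore 10 f n []) = (n : Int) := by
  induction f with
  | zero => intro n h; omega
  | succ f ih =>
    intro n h
    simp only [Nat.toDigitsCore]
    by_cases h0 : n / 10 = 0
    · have hn : n < 10 := by omega
      simp only [h0, if_true]
      have : pvChVal [(n % 10).digitChar] = ((n % 10 : Nat) : Int) := by
        simpa [pvChVal] using pvDigitChar_val (n % 10) (Nat.mod_lt _ (by norm_num))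
      rw [this, Nat.mod_eq_of_lt hn]
    · simp only [h0, if_false]
      rw [pvCore_append, pvChVal_append_digit,
        ih (n / 10) (by omega),
        pvDigitChar_val (n % 10) (Nat.mod_lt _ (by norm_num))]
      push_cast
      omega

lemma pvChVal_toChars (m : Int) (hm : 0 ≤ m) :
    pvChVal (PySem.Int.toChars m) = m := by
  unfold PySem.Int.toChars
  rw [if_neg (by omega)]
  rw [Nat.toDigits, pvCore_val (m.toNat + 1) m.toNat (by omega)]
  omega

-- the pure (un-modded) inner fold over digit characters
def pvGFold (r : Int) (cs : List Char) : Int :=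
  cs.foldl (fun a c => a * 10 + ((c.toNat : Int) - 48) * 3) r

lemma pvVFold_shift (cs : List Char) : ∀ (a : Int),
    cs.foldl (fun x c => x * 10 + ((c.toNat : Int) - 48)) a
      = a * 10 ^ cs.length + pvChVal cs := by
  induction cs with
  | nil => intro a; simp [pvChVal]
  | cons c cs ih =>
    intro a
    simp only [List.foldl_cons, List.length_cons]
    rw [ih]
    have h2 : pvChVal (c :: cs) = ((0:Int) * 10 + ((c.toNat : Int) - 48)) * 10 ^ cs.length + pvChVal cs := by
      show List.foldl _ _ (c :: cs) = _
      rw [List.foldl_cons, ih]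
    rw [h2]; ring

lemma pvGFold_eq (cs : List Char) : ∀ (r : Int),
    pvGFold r cs = r * 10 ^ cs.length + 3 * pvChVal cs := by
  induction cs with
  | nil => intro r; simp [pvGFold, pvChVal]
  | cons c cs ih =>
    intro r
    simp only [pvGFold, List.foldl_cons, List.length_cons] at *
    rw [ih]
    have h2 : pvChVal (c :: cs) = ((0:Int) * 10 + ((c.toNat : Int) - 48)) * 10 ^ cs.length + pvChVal cs := by
      show List.foldl _ _ (c :: cs) = _
      rw [List.foldl_cons, pvVFold_shift cs]
    rw [h2]; ring

-- threading the modulus through the inner fold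
lemma pvInner_mod (cs : List Char) : ∀ (r : Int),
    (cs.foldl (fun a c => (a * 10 + ((c.toNat : Int) - 48) * 3) % pvMOD) (r % pvMOD))
      = (pvGFold r cs) % pvMOD := by
  induction cs with
  | nil => intro r; simp [pvGFold]
  | cons c cs ih =>
    intro r
    simp only [List.foldl_cons, pvGFold] at *
    have key : (r % pvMOD * 10 + ((c.toNat : Int) - 48) * 3) % pvMOD
        = (r * 10 + ((c.toNat : Int) - 48) * 3) % pvMOD := by
      conv_lhs => rw [Int.add_emod, Int.mul_emod, Int.emod_emod_of_dvd r dvd_rfl]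
      conv_rhs => rw [Int.add_emod, Int.mul_emod]
    rw [key, ih (r * 10 + ((c.toNat : Int) - 48) * 3)]

lemma pvInnerA_eq (m r : Int) (hm : 0 ≤ m) (hr : r % pvMOD = r) :
    pvInnerA (pvDigitsA m) r
      = (r * 10 ^ (PySem.Int.toChars m).length + 3 * m) % pvMOD := by
  unfold pvInnerA pvDigitsA
  rw [PySem.Int.toList_toStr, List.foldl_map]
  simp only [PySem.Int.mod_eq_emod_of_pos pvM_pos]
  rw [← hr, pvInner_mod, pvGFold_eq, pvChVal_toChars m hm, hr]

lemma pvStepB_eq (r : Int) :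
    pvStepB r = (r * 10 ^ (PySem.Int.toChars r).length + 3 * r) % pvMOD := by
  unfold pvStepB
  rw [PySem.Int.toList_toStr, PySem.Int.mod_eq_emod_of_pos pvM_pos]
  ring_nf

lemma pvLoop_eq (j : Nat) : ∀ (r : Int), 0 ≤ r → r % pvMOD = r →
    pvLoopA j (pvDigitsA r) r = pvLoopB j r := by
  induction j with
  | zero => intro r _ _; rfl
  | succ j ih =>
    intro r hr hrm
    show pvLoopA (j + 1) (pvDigitsA r) r = pvLoopB (j + 1) r
    simp only [pvLoopA, pvLoopB]
    rw [pvInnerA_eq r r hr hrm, ← pvStepB_eq]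
    exact ih (pvStepB r)
      (by rw [pvStepB_eq]; exact Int.emod_nonneg _ (by decide))
      (by rw [pvStepB_eq]; exact Int.emod_emod_of_dvd _ dvd_rfl)

-- ===== VERDICT (by name: the statement is the Claim_ definition above) =====
theorem solve_with_direct_mod_spec : Claim_equal_solve_with_direct_mod := by
  intro n k _ hn
  unfold Spec_solve_with_direct_mod solve_with_direct_mod solve_with_direct_mod_alt
  rcases h : k.toNat with _ | j
  · rw [if_neg (by omega)]; rfl
  · rw [if_pos (by omega)]
    simp only [pvLoopA, Nat.add_sub_cancel]
    have h1 : pvInnerA (pvDigitsA n) 0 = (3 * n) % pvMOD := by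
      rw [pvInnerA_eq n 0 hn (by decide)]
      ring_nf
    rw [h1, PySem.Int.mod_eq_emod_of_pos pvM_pos]
    exact pvLoop_eq j _ (Int.emod_nonneg _ (by decide)) (Int.emod_emod_of_dvd _ dvd_rfl)
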